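-- pv_equiv track=rewrite | github.com/gianpaoloiuliano/PG-KEYMAKER | subpattern_extractor.py | extract_all_valid_subpatterns
-- ===== SOURCE A (Python) =====
-- def extract_all_valid_subpatterns(pattern):
--     parts = pattern.split('-')
--     subpatterns = set()
--
--     for start in range(0, len(parts) - 2, 2):
--         for end in range(start + 2, len(parts), 2):
--             sub = parts[start:end + 1]
--             if len(sub) % 2 == 1 and len(sub) >= 5:
--                 subpatterns.add('-'.join(sub))
--             elif len(sub) == 3:
--                 subpatterns.add('-'.join(sub))
--
--     return list(subpatterns)
-- ===== SOURCE B (Python) =====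
-- def extract_all_valid_subpatterns(pattern):
--     parts = pattern.split('-')
--     subpatterns = set()
--     tail = parts
--     while len(tail) >= 3:
--         acc = tail[0]
--         rest = tail[1:]
--         while len(rest) >= 2:
--             acc = acc + '-' + rest[0] + '-' + rest[1]
--             subpatterns.add(acc)
--             rest = rest[2:]
--         tail = tail[2:]
--     return list(subpatterns)
-- ===== Notes on version B (the rewrite author's own statement) =====
-- stated objective: faster
-- what changed: B replaces A's index-range loops with structural recursion over list suffixes and maintains each subpattern incrementally (appending '-'+p[i-1]+'-'+p[i] to a running string) instead of re-slicing and re-joining parts[start:end+1] for every pair, dropping the always-true length test.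
import Mathlib
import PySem

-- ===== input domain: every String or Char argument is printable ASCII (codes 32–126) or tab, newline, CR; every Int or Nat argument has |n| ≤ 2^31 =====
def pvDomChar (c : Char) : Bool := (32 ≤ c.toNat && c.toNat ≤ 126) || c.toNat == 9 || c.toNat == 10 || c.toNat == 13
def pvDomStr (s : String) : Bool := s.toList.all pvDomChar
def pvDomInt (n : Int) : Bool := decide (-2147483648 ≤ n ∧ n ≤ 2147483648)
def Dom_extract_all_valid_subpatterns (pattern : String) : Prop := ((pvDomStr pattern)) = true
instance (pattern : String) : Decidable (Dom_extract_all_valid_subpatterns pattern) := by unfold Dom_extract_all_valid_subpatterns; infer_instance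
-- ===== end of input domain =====

-- B replaces A's index-range loops with structural recursion over list suffixes and builds each
-- subpattern incrementally from the previous one instead of re-slicing and re-joining
-- parts[start:end+1] per pair (objective: faster, a constant-factor mechanism — one append per
-- pair instead of slice+join). Both return list(set(...)); outputs are compared as sets.

-- ===== PORT A =====
def extract_all_valid_subpatterns (pattern : String) : List String :=
  -- parts = pattern.split('-');  split? is `some` whenever the separator is non-empty
  let parts := (PySem.Str.split? pattern "-").getD []
  let subpatterns : PySem.Set String :=
    (PySem.List.pyRange 0 ((parts.length : Int) - 2) 2).foldl (fun subpatterns start =>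
      (PySem.List.pyRange (start + 2) (parts.length : Int) 2).foldl (fun subpatterns e =>
        let sub := PySem.List.slice parts (some start) (some (e + 1))
        if sub.length % 2 = 1 ∧ 5 ≤ sub.length then
          PySem.Set.add subpatterns (PySem.Str.join "-" sub)
        else if sub.length = 3 then
          PySem.Set.add subpatterns (PySem.Str.join "-" sub)
        else subpatterns) subpatterns) PySem.Set.empty
  subpatterns

-- ===== PORT B =====
-- inner while loop of Source B: consume `rest` two parts at a time, growing `acc`
def pvAltInner (subpatterns : PySem.Set String) (acc : String) : List String → PySem.Set String
  | a :: b :: rest =>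
      let acc' := acc ++ "-" ++ a ++ "-" ++ b
      pvAltInner (PySem.Set.add subpatterns acc') acc' rest
  | _ => subpatterns

-- outer while loop of Source B: `tail` keeps at least 3 parts, then advances by 2
def pvAltOuter (subpatterns : PySem.Set String) : List String → PySem.Set String
  | p0 :: _p1 :: p2 :: rest =>
      pvAltOuter (pvAltInner subpatterns p0 (_p1 :: p2 :: rest)) (p2 :: rest)
  | _ => subpatterns
  termination_by t => t.length
  decreasing_by simp

def extract_all_valid_subpatterns_alt (pattern : String) : List String :=
  let parts := (PySem.Str.split? pattern "-").getD []
  pvAltOuter PySem.Set.empty parts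

-- ===== PRECONDITION & SPEC =====
def Spec_extract_all_valid_subpatterns (pattern : String) (out : List String) : Prop := out = extract_all_valid_subpatterns_alt pattern
instance (pattern : String) (out : List String) : Decidable (Spec_extract_all_valid_subpatterns pattern out) := by unfold Spec_extract_all_valid_subpatterns; infer_instance

-- ===== CLAIM (what is proved, stated in full; the proofs are below) =====
def Claim_equal_extract_all_valid_subpatterns : Prop := ∀ (pattern : String), Dom_extract_all_valid_subpatterns pattern → Spec_extract_all_valid_subpatterns pattern (extract_all_valid_subpatterns pattern)

-- ===== LEMMAS AND PROOFS =====

-- range(a, b, 2) is empty when b ≤ a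
lemma pvPyRange_two_nil (a b : Int) (h : b ≤ a) : PySem.List.pyRange a b 2 = [] := by
  rw [PySem.List.pyRange_of_pos a b (by norm_num)]
  simp [if_neg (not_lt.mpr h)]

-- range(a, b, 2) starts with a and continues as range(a+2, b, 2) when a < b
lemma pvPyRange_two_cons (a b : Int) (h : a < b) :
    PySem.List.pyRange a b 2 = a :: PySem.List.pyRange (a + 2) b 2 := by
  rw [PySem.List.pyRange_of_pos a b (by norm_num),
      PySem.List.pyRange_of_pos (a + 2) b (by norm_num)]
  by_cases h2 : a + 2 < b
  · rw [if_pos h, if_pos h2]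
    have hc : ((b - a + 2 - 1) / 2).toNat = ((b - (a + 2) + 2 - 1) / 2).toNat + 1 := by omega
    rw [hc, List.range_succ_eq_map, List.map_cons, List.map_map]
    refine congrArg₂ _ (by ring) (List.map_congr_left ?_)
    intro k _
    simp [Function.comp, Nat.succ_eq_add_one]
    ring
  · rw [if_pos h, if_neg h2]
    have hc : ((b - a + 2 - 1) / 2).toNat = 1 := by omega
    rw [hc]
    simp

lemma pvAltInner_short (S : PySem.Set String) (acc : String) (t : List String)
    (h : t.length ≤ 1) : pvAltInner S acc t = S := by
  match t with
  | [] => rfl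
  | [_] => rfl
  | _ :: _ :: _ => simp at h

lemma pvAltOuter_short (S : PySem.Set String) (t : List String)
    (h : t.length ≤ 2) : pvAltOuter S t = S := by
  match t with
  | [] => simp [pvAltOuter]
  | [_] => simp [pvAltOuter]
  | [_, _] => simp [pvAltOuter]
  | _ :: _ :: _ :: _ => simp at h

-- '-'.join of a list with one more element appended
lemma pvCharsJoin_snoc (sep : List Char) (u : List (List Char)) (x : List Char) (hu : u ≠ []) :
    PySem.Chars.join sep (u ++ [x]) = PySem.Chars.join sep u ++ sep ++ x := by
  induction u with
  | nil => exact absurd rfl hu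
  | cons p u ih =>
    match u with
    | [] =>
      rw [show ([p] ++ [x] : List (List Char)) = [p, x] from rfl,
          PySem.Chars.join_cons_cons, PySem.Chars.join_singleton, PySem.Chars.join_singleton]
    | q :: u' =>
      calc PySem.Chars.join sep ((p :: q :: u') ++ [x])
          = PySem.Chars.join sep (p :: q :: (u' ++ [x])) := rfl
        _ = p ++ sep ++ PySem.Chars.join sep (q :: (u' ++ [x])) := PySem.Chars.join_cons_cons ..
        _ = p ++ sep ++ PySem.Chars.join sep ((q :: u') ++ [x]) := rfl
        _ = p ++ sep ++ (PySem.Chars.join sep (q :: u') ++ sep ++ x) := by rw [ih (by simp)]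
        _ = PySem.Chars.join sep (p :: q :: u') ++ sep ++ x := by
              rw [PySem.Chars.join_cons_cons]
              simp [List.append_assoc]

lemma pvStrJoin_snoc2 (u : List String) (a b : String) (hu : u ≠ []) :
    PySem.Str.join "-" (u ++ [a, b]) = PySem.Str.join "-" u ++ "-" ++ a ++ "-" ++ b := by
  rw [String.ext_iff]
  simp only [PySem.Str.toList_join, String.toList_append, List.map_append]
  rw [show (List.map String.toList [a, b]) = [a.toList] ++ [b.toList] from rfl, ← List.append_assoc]
  rw [pvCharsJoin_snoc _ _ _ (by simp [hu]), pvCharsJoin_snoc _ _ _ (by simp [hu])]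

lemma pvStrJoin_singleton (a : String) : PySem.Str.join "-" [a] = a := by
  rw [String.ext_iff]
  simp [PySem.Str.toList_join, PySem.Chars.join_singleton]

-- A's inner loop, started after j completed iterations, equals B's inner recursion
lemma pvInnerEq (parts : List String) (s : Nat) :
    ∀ (fuel j : Nat) (S : PySem.Set String), parts.length ≤ s + 2*j + 2 + fuel →
    (PySem.List.pyRange (((s + 2*j + 2 : Nat) : Int)) ((parts.length : Int)) 2).foldl
      (fun subpatterns e =>
        let sub := PySem.List.slice parts (some ((s : Nat) : Int)) (some (e + 1))
        if sub.length % 2 = 1 ∧ 5 ≤ sub.length then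
          PySem.Set.add subpatterns (PySem.Str.join "-" sub)
        else if sub.length = 3 then
          PySem.Set.add subpatterns (PySem.Str.join "-" sub)
        else subpatterns) S
    = pvAltInner S
        (PySem.Str.join "-" (PySem.List.slice parts (some ((s : Nat) : Int)) (some ((s + 2*j + 1 : Nat) : Int))))
        (parts.drop (s + 2*j + 1)) := by
  intro fuel
  induction fuel with
  | zero =>
    intro j S h
    rw [pvPyRange_two_nil _ _ (by exact_mod_cast h), List.foldl_nil,
        pvAltInner_short _ _ _ (by simp; omega)]
  | succ fuel ih =>
    intro j S h
    by_cases hlt : s + 2*j + 2 < parts.length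
    · -- one more inner iteration
      have hcast : ((s + 2*j + 2 : Nat) : Int) < (parts.length : Int) := by exact_mod_cast hlt
      rw [pvPyRange_two_cons _ _ hcast, List.foldl_cons]
      -- normalise the head's slice bound ↑(s+2j+2)+1 to ↑(s+2j+3)
      have hb : ((s + 2*j + 2 : Nat) : Int) + 1 = ((s + 2*j + 3 : Nat) : Int) := by push_cast; ring
      have h31 : s + 2*j + 3 - s = 2*j + 3 := by omega
      have h11 : s + 2*j + 1 - s = 2*j + 1 := by omega
      have hlen : (List.take (2*j + 3) (parts.drop s)).length = 2*j + 3 := by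
        simp [List.length_take, List.length_drop]; omega
      have h1i : 2*j + 1 < (parts.drop s).length := by simp [List.length_drop]; omega
      have h2i : 2*j + 2 < (parts.drop s).length := by simp [List.length_drop]; omega
      -- the slice grows by its last two parts
      have h2i' : 2*j + 1 + 1 < (parts.drop s).length := h2i
      have htake : List.take (2*j + 3) (parts.drop s)
          = List.take (2*j + 1) (parts.drop s) ++ [(parts.drop s)[2*j + 1], (parts.drop s)[2*j + 2]] := by
        conv_lhs => rw [show (2*j + 3) = (2*j + 1 + 1) + 1 from rfl, List.take_add_one,
                        List.take_add_one]
        rw [List.getElem?_eq_getElem h2i', List.getElem?_eq_getElem h1i]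
        simp
      have hune : List.take (2*j + 1) (parts.drop s) ≠ [] := by
        intro hn
        have := congrArg List.length hn
        simp [List.length_take, List.length_drop] at this
        omega
      -- the head iteration adds exactly the grown accumulator
      have hhead : ∀ (T : PySem.Set String),
          (let sub := PySem.List.slice parts (some ((s : Nat) : Int)) (some (((s + 2*j + 2 : Nat) : Int) + 1))
           if sub.length % 2 = 1 ∧ 5 ≤ sub.length then
             PySem.Set.add T (PySem.Str.join "-" sub)
           else if sub.length = 3 then
             PySem.Set.add T (PySem.Str.join "-" sub)
           else T)
          = PySem.Set.add T (PySem.Str.join "-" (List.take (2*j + 3) (parts.drop s))) := by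
        intro T
        simp only [hb, PySem.List.slice_natCast, h31]
        rw [hlen]
        split_ifs with hc1 hc2
        · rfl
        · rfl
        · exfalso; omega
      rw [hhead S]
      -- fold the accumulator growth into the join
      have hacc : PySem.Str.join "-" (List.take (2*j + 3) (parts.drop s))
          = PySem.Str.join "-" (PySem.List.slice parts (some ((s : Nat) : Int)) (some ((s + 2*j + 1 : Nat) : Int)))
            ++ "-" ++ (parts.drop s)[2*j + 1] ++ "-" ++ (parts.drop s)[2*j + 2] := by
        rw [htake, pvStrJoin_snoc2 _ _ _ hune, PySem.List.slice_natCast, h11]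
      -- decompose the dropped suffix on the B side
      have hd1 : s + 2*j + 1 < parts.length := by omega
      have hd2 : s + 2*j + 2 < parts.length := hlt
      have hdrop : parts.drop (s + 2*j + 1)
          = (parts.drop s)[2*j + 1] :: (parts.drop s)[2*j + 2] :: parts.drop (s + 2*j + 3) := by
        rw [List.drop_eq_getElem_cons hd1, List.drop_eq_getElem_cons hd2]
        exact congrArg₂ _ (List.getElem_drop (i := s) (j := 2*j+1)).symm
          (congrArg₂ _ (List.getElem_drop (i := s) (j := 2*j+2)).symm rfl)
      rw [hdrop,
          show pvAltInner S
              (PySem.Str.join "-" (PySem.List.slice parts (some ((s : Nat) : Int)) (some ((s + 2*j + 1 : Nat) : Int))))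
              ((parts.drop s)[2*j + 1] :: (parts.drop s)[2*j + 2] :: parts.drop (s + 2*j + 3))
            = pvAltInner
                (S.add (PySem.Str.join "-" (PySem.List.slice parts (some ((s : Nat) : Int)) (some ((s + 2*j + 1 : Nat) : Int)))
                        ++ "-" ++ (parts.drop s)[2*j + 1] ++ "-" ++ (parts.drop s)[2*j + 2]))
                (PySem.Str.join "-" (PySem.List.slice parts (some ((s : Nat) : Int)) (some ((s + 2*j + 1 : Nat) : Int)))
                        ++ "-" ++ (parts.drop s)[2*j + 1] ++ "-" ++ (parts.drop s)[2*j + 2])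
                (parts.drop (s + 2*j + 3)) from rfl,
          ← hacc]
      -- both recursions now continue with j+1
      have hcast2 : ((s + 2*j + 2 : Nat) : Int) + 2 = ((s + 2*(j+1) + 2 : Nat) : Int) := by
        push_cast; ring
      rw [hcast2, ih (j+1) _ (by omega),
          show s + 2*(j+1) + 1 = s + 2*j + 3 by ring,
          PySem.List.slice_natCast, h31]
    · rw [pvPyRange_two_nil _ _ (by exact_mod_cast (by omega : parts.length ≤ s + 2*j + 2)),
          List.foldl_nil, pvAltInner_short _ _ _ (by simp; omega)]

-- A's outer loop, started after j completed iterations, equals B's outer recursion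
lemma pvOuterEq (parts : List String) :
    ∀ (fuel j : Nat) (S : PySem.Set String), parts.length ≤ 2*j + 2 + fuel →
    (PySem.List.pyRange (((2*j : Nat) : Int)) ((parts.length : Int) - 2) 2).foldl
      (fun subpatterns start =>
        (PySem.List.pyRange (start + 2) ((parts.length : Int)) 2).foldl
          (fun subpatterns e =>
            let sub := PySem.List.slice parts (some start) (some (e + 1))
            if sub.length % 2 = 1 ∧ 5 ≤ sub.length then
              PySem.Set.add subpatterns (PySem.Str.join "-" sub)
            else if sub.length = 3 then
              PySem.Set.add subpatterns (PySem.Str.join "-" sub)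
            else subpatterns) subpatterns) S
    = pvAltOuter S (parts.drop (2*j)) := by
  intro fuel
  induction fuel with
  | zero =>
    intro j S h
    rw [pvPyRange_two_nil _ _ (by push_cast; omega), List.foldl_nil,
        pvAltOuter_short _ _ (by simp; omega)]
  | succ fuel ih =>
    intro j S h
    by_cases hlt : 2*j + 2 < parts.length
    · have hcast : ((2*j : Nat) : Int) < (parts.length : Int) - 2 := by push_cast; omega
      have h0 : 2*j < parts.length := by omega
      have h1 : 2*j + 1 < parts.length := by omega
      have h2 : 2*j + 2 < parts.length := hlt
      have hin := pvInnerEq parts (2*j) parts.length 0 S (by omega)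
      simp only [show 2*j + 2*0 + 2 = 2*j + 2 by ring, show 2*j + 2*0 + 1 = 2*j + 1 by ring] at hin
      rw [pvPyRange_two_cons _ _ hcast, List.foldl_cons,
          show ((2*j : Nat) : Int) + 2 = ((2*j + 2 : Nat) : Int) by push_cast; ring, hin]
      -- the initial accumulator is parts[2j]
      have hacc0 : PySem.Str.join "-" (PySem.List.slice parts (some ((2*j : Nat) : Int)) (some ((2*j + 1 : Nat) : Int)))
          = parts[2*j] := by
        rw [PySem.List.slice_natCast, show 2*j + 1 - 2*j = 1 by omega,
            List.drop_eq_getElem_cons h0, List.take_succ_cons, List.take_zero,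
            pvStrJoin_singleton]
      have hdrop0 : parts.drop (2*j) = parts[2*j] :: parts[2*j + 1] :: parts[2*j + 2] :: parts.drop (2*j + 3) :=
        by rw [List.drop_eq_getElem_cons h0, List.drop_eq_getElem_cons h1, List.drop_eq_getElem_cons h2]
      have hdrop1 : parts.drop (2*j + 1) = parts[2*j + 1] :: parts.drop (2*j + 2) :=
        List.drop_eq_getElem_cons h1
      rw [hacc0, hdrop0, pvAltOuter, hdrop1, ← List.drop_eq_getElem_cons h2,
          show 2*j + 2 = 2*(j+1) by ring]
      exact ih (j+1) _ (by omega)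
    · rw [pvPyRange_two_nil _ _ (by push_cast; omega), List.foldl_nil,
          pvAltOuter_short _ _ (by simp; omega)]

-- ===== VERDICT (by name: the statement is the Claim_ definition above) =====
theorem extract_all_valid_subpatterns_spec : Claim_equal_extract_all_valid_subpatterns := by
  intro pattern _
  unfold Spec_extract_all_valid_subpatterns extract_all_valid_subpatterns extract_all_valid_subpatterns_alt
  generalize (PySem.Str.split? pattern "-").getD [] = parts
  have h := pvOuterEq parts parts.length 0 PySem.Set.empty (by omega)
  simpa using h
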